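-- pv_equiv track=rewrite | github.com/prink-patel/prink-hapaliya-aiml-training-2024 | DSA/Dynamic data structures/pra10-8.py | check
-- ===== SOURCE A (Python) =====
-- def check(a):
--     result={}
--     b=set(a)
--     if len(a)%2==0:
--         return "yes"
--     else:
--         for i in a:
--             if i in result:
--                 return "Yes"
--             else:
--                 result[i]=1
--         else:
--             return "No"
-- ===== SOURCE B (Python) =====
-- def check(a):
--     if len(a) % 2 == 0:
--         return "yes"
--     b = sorted(a)
--     for x, y in zip(b, b[1:]):
--         if x == y:
--             return "Yes"
--     return "No"
-- ===== Notes on version B (the rewrite author's own statement) =====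
-- stated objective: alternative
-- what changed: Duplicate detection by sorting and scanning adjacent pairs for an equal neighbour, instead of A's hash-membership dict loop.
import Mathlib
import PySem

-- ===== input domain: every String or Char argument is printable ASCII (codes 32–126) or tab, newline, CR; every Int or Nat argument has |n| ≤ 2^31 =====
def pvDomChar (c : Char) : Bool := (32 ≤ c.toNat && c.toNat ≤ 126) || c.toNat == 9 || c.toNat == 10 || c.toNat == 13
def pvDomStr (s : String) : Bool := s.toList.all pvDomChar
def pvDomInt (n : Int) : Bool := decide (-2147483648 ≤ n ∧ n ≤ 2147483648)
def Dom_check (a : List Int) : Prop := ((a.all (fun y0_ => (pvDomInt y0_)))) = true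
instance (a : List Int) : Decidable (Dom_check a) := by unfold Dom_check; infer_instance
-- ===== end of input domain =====

-- B replaces A's hash-membership dict loop with sort-then-adjacent-pair scan; objective: alternative.

-- ===== PORT A =====
-- the for-loop with early return "Yes" / else-clause "No"
def checkLoop (xs : List Int) (result : PySem.Dict Int Int) : String :=
  match xs with
  | [] => "No"
  | i :: rest =>
      if result.contains i then "Yes"
      else checkLoop rest (result.insert i 1)

def check (a : List Int) : String :=
  let _b := PySem.Set.ofList a
  if (a.length : Int) % 2 == 0 then "yes"
  else checkLoop a PySem.Dict.empty

-- ===== PORT B =====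
-- the loop over zip(b, b[1:]): an equal adjacent pair returns "Yes", falling off returns "No"
def scanAdj (l : List Int) : String :=
  match l with
  | x :: y :: t => if x == y then "Yes" else scanAdj (y :: t)
  | _ => "No"

def check_alt (a : List Int) : String :=
  if (a.length : Int) % 2 == 0 then "yes"
  else scanAdj (PySem.List.sorted a (fun x => x) false)

-- ===== PRECONDITION & SPEC =====
def Spec_check (a : List Int) (out : String) : Prop := out = check_alt a
instance (a : List Int) (out : String) : Decidable (Spec_check a out) := by unfold Spec_check; infer_instance

-- ===== CLAIM (what is proved, stated in full; the proofs are below) =====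
def Claim_equal_check : Prop := ∀ (a : List Int), Dom_check a → Spec_check a (check a)

-- ===== LEMMAS AND PROOFS =====

-- A's loop returns "No" exactly when the remaining elements are pairwise distinct and none is already a key.
theorem checkLoop_eq (xs : List Int) : ∀ (d : PySem.Dict Int Int),
    checkLoop xs d =
      if xs.Nodup ∧ ∀ i ∈ xs, d.contains i = false then "No" else "Yes" := by
  induction xs with
  | nil => intro d; simp [checkLoop]
  | cons i rest ih =>
      intro d
      rw [checkLoop]
      by_cases hc : d.contains i = true
      · rw [if_pos (by simp [hc]), if_neg]
        rintro ⟨-, hall⟩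
        have := hall i (by simp)
        rw [hc] at this
        cases this
      · have hc' : d.contains i = false := by simpa using hc
        rw [if_neg (by simp [hc']), ih]
        congr 1
        simp only [PySem.Dict.contains_insert, List.nodup_cons, List.mem_cons, eq_iff_iff]
        constructor
        · rintro ⟨hn, hall⟩
          refine ⟨⟨fun hmem => ?_, hn⟩, ?_⟩
          · have := hall i hmem; simp at this
          · rintro j (rfl | hj)
            · exact hc'
            · have := hall j hj; simp at this; exact this.2
        · rintro ⟨⟨hni, hn⟩, hall⟩
          refine ⟨hn, fun j hj => ?_⟩
          have hjne : j ≠ i := fun h => hni (h ▸ hj)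
          have := hall j (Or.inr hj)
          simp [hjne, this]

-- on a list sorted in nondecreasing order, the adjacent scan finds an equal pair iff there is a duplicate
theorem scanAdj_eq (l : List Int) (hp : l.Pairwise (· ≤ ·)) :
    scanAdj l = if l.Nodup then "No" else "Yes" := by
  induction l with
  | nil => simp [scanAdj]
  | cons x t ih =>
      cases t with
      | nil => simp [scanAdj]
      | cons y s =>
          rw [scanAdj]
          by_cases hxy : x = y
          · subst hxy
            rw [if_pos (by simp), if_neg]
            simp [List.nodup_cons]
          · rw [if_neg (by simpa using hxy)]
            have hp' : (y :: s).Pairwise (· ≤ ·) := hp.tail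
            rw [ih hp']
            have hxle : ∀ z ∈ y :: s, x ≤ z := fun z hz => (List.pairwise_cons.mp hp).1 z hz
            have hyle : ∀ z ∈ s, y ≤ z := fun z hz => (List.pairwise_cons.mp hp').1 z hz
            have hxnot : x ∉ y :: s := by
              intro hmem
              rcases List.mem_cons.mp hmem with rfl | hmem'
              · exact hxy rfl
              · have h1 : x ≤ y := hxle y (by simp)
                have h2 : y ≤ x := hyle x hmem'
                exact hxy (le_antisymm h1 h2)
            congr 1
            simp [List.nodup_cons, hxnot]

-- ===== VERDICT (by name: the statement is the Claim_ definition above) =====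
theorem check_spec : Claim_equal_check := by
  intro a _
  unfold Spec_check check check_alt
  by_cases he : (a.length : Int) % 2 == 0
  · simp [he]
  · simp only [he, Bool.false_eq_true, if_false]
    rw [checkLoop_eq, scanAdj_eq _ (by simpa using PySem.List.sorted_pairwise a (fun x => x) )]
    have hempty : ∀ i ∈ a, (PySem.Dict.empty : PySem.Dict Int Int).contains i = false := by
      intro i _; rfl
    have hperm : (PySem.List.sorted a (fun x => x) false).Perm a :=
      PySem.List.sorted_perm a (fun x => x) false
    by_cases hn : a.Nodup
    · rw [if_pos ⟨hn, hempty⟩, if_pos (hperm.nodup_iff.mpr hn)]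
    · rw [if_neg (by tauto), if_neg (fun h => hn (hperm.nodup_iff.mp h))]
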